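-- pv_equiv track=rewrite | github.com/estesoriano/Ejercicios-Python-Template | ejercicio5.py | generarPares
-- ===== SOURCE A (Python) =====
-- def esPar(numero) :
--     if(numero % 2 == 0):
--         return True
--     else:
--         return False # --> Implemente código de la función <--
--
-- def esImpar(numero) :
--     if(numero % 2 != 0):
--         return True
--     else:
--         return False # --> Implemente código de la función <--
--
-- def generarPares(valores, inicio) :
--     pares=[]
--     numero=inicio
--     if esImpar(inicio) :
--         numero=inicio+1
--
--     contador = 0
--     while contador < valores:
--         if esPar(numero):
--             pares.append(numero)
--             contador=contador+1
--         numero=numero+1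
--
--     return pares
-- ===== SOURCE B (Python) =====
-- def esPar(numero):
--     if(numero % 2 == 0):
--         return True
--     else:
--         return False
--
-- def esImpar(numero):
--     if(numero % 2 != 0):
--         return True
--     else:
--         return False
--
-- def generarPares(valores, inicio):
--     start = inicio if esPar(inicio) else inicio + 1
--     return [start + 2 * i for i in range(valores)]
-- ===== Notes on version B (the rewrite author's own statement) =====
-- stated objective: simpler
-- what changed: B computes the first even value >= inicio once and builds the list by direct arithmetic (start + 2*i over an index range), removing A's integer scan with a running counter and per-element parity test.
import Mathlib
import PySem

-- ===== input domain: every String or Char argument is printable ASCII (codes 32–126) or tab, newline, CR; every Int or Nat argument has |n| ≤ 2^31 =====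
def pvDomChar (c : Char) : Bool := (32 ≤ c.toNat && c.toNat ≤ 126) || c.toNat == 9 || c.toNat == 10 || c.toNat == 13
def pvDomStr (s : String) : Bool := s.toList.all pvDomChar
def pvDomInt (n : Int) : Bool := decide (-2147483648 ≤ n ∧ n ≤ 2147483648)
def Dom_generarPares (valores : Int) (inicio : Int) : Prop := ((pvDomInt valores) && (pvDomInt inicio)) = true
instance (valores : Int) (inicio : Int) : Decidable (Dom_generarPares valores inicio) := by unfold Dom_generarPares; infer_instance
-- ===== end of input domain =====

-- B computes the first even value ≥ inicio once and builds the result by index arithmetic, replacing A's counter-driven scan with a per-element parity test; same return values, simpler control flow.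


-- ===== PORT A =====
-- esPar(numero): numero % 2 == 0 (Python % with positive divisor = PySem.Int.mod)
def esPar (numero : Int) : Bool :=
  if PySem.Int.mod numero 2 == 0 then true else false

def esImpar (numero : Int) : Bool :=
  if PySem.Int.mod numero 2 != 0 then true else false

-- bridge used by the loop's termination argument (cited in decreasing_by)
theorem esPar_eq (n : Int) : esPar n = decide (n % 2 = 0) := by
  simp [esPar]

-- the while loop of A: scan integers, append evens, count until 'valores' are collected
def generarParesLoop (valores : Int) (pares : List Int) (numero : Int) (contador : Int) : List Int :=
  if h : contador < valores then
    if hp : esPar numero then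
      generarParesLoop valores (pares ++ [numero]) (numero + 1) (contador + 1)
    else
      generarParesLoop valores pares (numero + 1) contador
  else pares
termination_by (2 * (valores - contador) + (if esPar numero then 0 else 1)).toNat
decreasing_by
  · simp only [esPar_eq, decide_eq_true_eq] at hp ⊢
    split_ifs at hp ⊢ <;> omega
  · simp only [esPar_eq, decide_eq_true_eq] at hp ⊢
    split_ifs at hp ⊢ <;> omega

def generarPares (valores : Int) (inicio : Int) : List Int :=
  let pares : List Int := []
  let numero := inicio
  let numero := if esImpar inicio then inicio + 1 else numero
  generarParesLoop valores pares numero 0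

-- ===== PORT B =====
def generarPares_alt (valores : Int) (inicio : Int) : List Int :=
  let start := if esPar inicio then inicio else inicio + 1
  (PySem.List.pyRange 0 valores 1).map (fun i => start + 2 * i)

-- ===== PRECONDITION & SPEC =====
def Spec_generarPares (valores : Int) (inicio : Int) (out : List Int) : Prop := out = generarPares_alt valores inicio
instance (valores : Int) (inicio : Int) (out : List Int) : Decidable (Spec_generarPares valores inicio out) := by unfold Spec_generarPares; infer_instance

-- ===== CLAIM (what is proved, stated in full; the proofs are below) =====
def Claim_equal_generarPares : Prop := ∀ (valores : Int) (inicio : Int), Dom_generarPares valores inicio → Spec_generarPares valores inicio (generarPares valores inicio)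

-- ===== LEMMAS AND PROOFS =====

-- ===== VERDICT (by name: the statement is the Claim_ definition above) =====
theorem loop_odd (valores : Int) (pares : List Int) (numero contador : Int)
    (h : esPar numero = false) :
    generarParesLoop valores pares numero contador
      = generarParesLoop valores pares (numero + 1) contador := by
  rw [generarParesLoop]
  by_cases hc : contador < valores
  · simp [hc, h]
  · conv_rhs => rw [generarParesLoop]
    simp [hc]

theorem esPar_succ (n : Int) (h : esPar n = true) : esPar (n + 1) = false := by
  simp [esPar_eq] at h ⊢; omega

theorem esPar_succ_succ (n : Int) (h : esPar n = true) : esPar (n + 2) = true := by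
  simp [esPar_eq] at h ⊢; omega

-- invariant: starting at an even numero with n values still to collect,
-- the loop appends numero, numero+2, ..., numero+2(n-1)
theorem loop_even (n : Nat) : ∀ (valores : Int) (pares : List Int) (numero contador : Int),
    esPar numero = true → contador + n = valores →
    generarParesLoop valores pares numero contador
      = pares ++ (List.range n).map (fun i : Nat => numero + 2 * (i : Int)) := by
  induction n with
  | zero =>
    intro valores pares numero contador _ hn
    rw [generarParesLoop]
    simp [show ¬ contador < valores by omega]
  | succ m ih =>
    intro valores pares numero contador hpar hn
    rw [generarParesLoop]
    simp only [show contador < valores by push_cast at hn; omega, dif_pos, hpar]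
    rw [loop_odd _ _ _ _ (esPar_succ _ hpar)]
    have h2 : numero + 1 + 1 = numero + 2 := by ring
    rw [h2, ih valores (pares ++ [numero]) (numero + 2) (contador + 1)
        (esPar_succ_succ _ hpar) (by push_cast at hn ⊢; omega)]
    rw [List.range_succ_eq_map, List.map_cons, List.map_map, List.append_assoc,
        List.singleton_append]
    simp only [Nat.cast_zero, mul_zero, add_zero]
    congr 1
    congr 1
    apply List.map_congr_left
    intro i _
    simp only [Function.comp_apply]
    push_cast
    ring

theorem generarPares_spec : Claim_equal_generarPares := by
  intro valores inicio _
  unfold Spec_generarPares generarPares generarPares_alt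
  by_cases h : esPar inicio = true
  · have himp : esImpar inicio = false := by
      simp [esPar_eq] at h
      simp [esImpar, h]
    by_cases hv : valores ≤ 0
    · rw [generarParesLoop]
      simp [show ¬ (0:Int) < valores by omega, PySem.List.pyRange_one_eq_nil hv]
    · simp only [himp, h, Bool.false_eq_true, if_false, if_true]
      rw [loop_even valores.toNat valores [] inicio 0 h (by omega),
          PySem.List.pyRange_one, List.map_map]
      simp only [List.nil_append, sub_zero]
      apply List.map_congr_left
      intro i _
      simp only [Function.comp_apply]
      ring
  · have hb : esPar inicio = false := by simpa using h
    have himp : esImpar inicio = true := by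
      simp [esPar_eq] at hb
      simp [esImpar]
      omega
    have h1 : esPar (inicio + 1) = true := by
      simp [esPar_eq] at hb ⊢; omega
    by_cases hv : valores ≤ 0
    · rw [generarParesLoop]
      simp [show ¬ (0:Int) < valores by omega, PySem.List.pyRange_one_eq_nil hv]
    · simp only [himp, hb, Bool.false_eq_true, if_false, if_true]
      rw [loop_even valores.toNat valores [] (inicio + 1) 0 h1 (by omega),
          PySem.List.pyRange_one, List.map_map]
      simp only [List.nil_append, sub_zero]
      apply List.map_congr_left
      intro i _
      simp only [Function.comp_apply]
      ring
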